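-- pv_equiv track=rewrite | github.com/ElijahWilson-Kelly/betsy-webshop | main.py | close_enough_search
-- ===== SOURCE A (Python) =====
-- def close_enough_search(term, text):
--     """
--     Returns Whether a given term matches with any of the words in a given text.
--
--     matching rules:
--         Depending on length of term string {>=10, >=6, >=3} either 3, 2 or 1 characters can be different between given word and term.
--         If all other character (case-insensitive) are the same between word and term for the same indices then it counts as a match.
--         If the substring word[0:len(term)] is a perfect match (no different characters) then the word is a match.
--         If a word is longer than the search term it is NOT a match.
--
--         term ("play") will match with "playing"
--         term ("ploy") will match with "play"
--         term ("cumfertibly") will match with "comfortably"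
--
--     Args:
--         term (string): Term being looked for
--         text (string): Text being looked through
--
--     Returns:
--         (bool): True or False whether the text contains exactly or close enough to the specified term.
--     """
--     term = term.lower()
--     text = text.lower()
--     words = text.split(" ")
--
--     NUMBER_OF_MISSES_ALLOWED = 0
--     if len(term) >= 10:
--         NUMBER_OF_MISSES_ALLOWED = 3
--     elif len(term) >= 6:
--         NUMBER_OF_MISSES_ALLOWED = 2
--     elif len(term) >= 3:
--         NUMBER_OF_MISSES_ALLOWED = 1
--
--     for word in words:
--         if len(term) > len(word):
--             continue
--         misses = 0
--         for i in range(len(term)):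
--             if term[i] != word[i]:
--                 misses += 1
--         if misses == 0:
--             return True
--         if misses <= NUMBER_OF_MISSES_ALLOWED and len(term) == len(word):
--             return True
--     return False
-- ===== SOURCE B (Python) =====
-- def close_enough_search(term, text):
--     # Single pass over the raw text: instead of splitting into words and
--     # re-scanning each word, stream the characters once, keeping an automaton
--     # state (chars seen in the current word, mismatches against term among the
--     # first len(term) positions) and judge each word at its space boundary.
--     t = term.lower()
--     n = len(t)
--     allowed = 3 if n >= 10 else 2 if n >= 6 else 1 if n >= 3 else 0
--     i = 0       # length of the current word so far
--     misses = 0  # mismatches at positions < n of the current word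
--     for c in text.lower() + ' ':   # sentinel space closes the last word
--         if c == ' ':
--             if (i >= n and misses == 0) or (i == n and misses <= allowed):
--                 return True
--             i = 0
--             misses = 0
--         else:
--             if i < n and c != t[i]:
--                 misses += 1
--             i += 1
--     return False
-- ===== Notes on version B (the rewrite author's own statement) =====
-- stated objective: alternative
-- what changed: Replaces A's split-into-words plus per-word indexed mismatch loop with a single streaming pass over the raw text that maintains an automaton state (current word length, mismatch count against term) and judges each word at its space boundary, never materialising the word list.
import Mathlib
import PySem

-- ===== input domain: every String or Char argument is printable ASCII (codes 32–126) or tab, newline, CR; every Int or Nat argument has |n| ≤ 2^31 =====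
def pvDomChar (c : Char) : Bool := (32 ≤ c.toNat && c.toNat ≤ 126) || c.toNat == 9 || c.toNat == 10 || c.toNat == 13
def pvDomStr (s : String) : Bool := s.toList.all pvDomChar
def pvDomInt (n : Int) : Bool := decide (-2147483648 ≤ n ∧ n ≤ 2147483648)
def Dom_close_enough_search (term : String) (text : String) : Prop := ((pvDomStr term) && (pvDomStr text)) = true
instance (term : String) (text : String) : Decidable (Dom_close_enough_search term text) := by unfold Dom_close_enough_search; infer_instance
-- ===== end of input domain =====

-- B replaces A's split-into-words + per-word indexed mismatch loop with a single
-- streaming pass over the raw text (automaton state: current word length and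
-- mismatch count, judged at each space boundary); objective: alternative.
-- Return values are proved equal on the whole domain.

-- ===== PORT A =====
-- NUMBER_OF_MISSES_ALLOWED if/elif chain
def pvAllowedA (term : List Char) : Nat :=
  if term.length ≥ 10 then 3
  else if term.length ≥ 6 then 2
  else if term.length ≥ 3 then 1
  else 0

-- inner 'for i in range(len(term)): if term[i] != word[i]: misses += 1'
-- (getD is exact here: every call site has i < term.length ≤ word.length, so
--  both indexings are in range and Python never raises)
def pvMissesA (term word : List Char) : Nat :=
  (List.range term.length).foldl
    (fun m i => if term.getD i ' ' ≠ word.getD i ' ' then m + 1 else m) 0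

-- the 'for word in words' loop with its continue / early returns
def pvLoopA (term : List Char) (allowed : Nat) : List (List Char) → Bool
  | [] => false
  | w :: ws =>
    if term.length > w.length then pvLoopA term allowed ws
    else
      let misses := pvMissesA term w
      if misses = 0 then true
      else if misses ≤ allowed ∧ term.length = w.length then true
      else pvLoopA term allowed ws

def close_enough_search (term : String) (text : String) : Bool :=
  let t := PySem.Chars.lower term.toList
  let x := PySem.Chars.lower text.toList
  pvLoopA t (pvAllowedA t) (PySem.Chars.splitOn x [' '])

-- ===== PORT B =====
-- '3 if len(term) >= 10 else 2 if len(term) >= 6 else 1 if len(term) >= 3 else 0'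
def pvAllowedB (term : List Char) : Nat :=
  if term.length ≥ 10 then 3
  else if term.length ≥ 6 then 2
  else if term.length ≥ 3 then 1
  else 0

-- the 'for c in text.lower() + " "' streaming loop with state (i, misses);
-- the early 'return True' at a boundary becomes the true branch of the test
def pvScanB (t : List Char) (n al : Nat) : Nat → Nat → List Char → Bool
  | _, _, [] => false
  | i, m, c :: cs =>
    if c = ' ' then
      if (n ≤ i ∧ m = 0) ∨ (i = n ∧ m ≤ al) then true
      else pvScanB t n al 0 0 cs
    else pvScanB t n al (i + 1) (if i < n ∧ c ≠ t.getD i ' ' then m + 1 else m) cs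

def close_enough_search_alt (term : String) (text : String) : Bool :=
  let t := PySem.Chars.lower term.toList
  pvScanB t t.length (pvAllowedB t) 0 0 (PySem.Chars.lower text.toList ++ [' '])

-- ===== PRECONDITION & SPEC =====
def Spec_close_enough_search (term : String) (text : String) (out : Bool) : Prop := out = close_enough_search_alt term text
instance (term : String) (text : String) (out : Bool) : Decidable (Spec_close_enough_search term text out) := by unfold Spec_close_enough_search; infer_instance

-- ===== CLAIM (what is proved, stated in full; the proofs are below) =====
def Claim_equal_close_enough_search : Prop := ∀ (term : String) (text : String), Dom_close_enough_search term text → Spec_close_enough_search term text (close_enough_search term text)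

-- ===== LEMMAS AND PROOFS =====

-- the common mismatch count over paired positions (stops at the shorter list)
def pvMM : List Char → List Char → Nat
  | _, [] => 0
  | [], _ :: _ => 0
  | a :: as, b :: bs => (if a ≠ b then 1 else 0) + pvMM as bs

-- B's running mismatch count over a word, starting at offset i
def pvCnt (t : List Char) (n : Nat) : Nat → List Char → Nat
  | _, [] => 0
  | i, c :: cs => (if i < n ∧ c ≠ t.getD i ' ' then 1 else 0) + pvCnt t n (i + 1) cs

-- prepend to the head piece (pvSplit never returns [])
def pvConsHead (p : List Char) : List (List Char) → List (List Char)
  | [] => [p]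
  | h :: tl => (p ++ h) :: tl

-- clean structural form of text.split(' ')
def pvSplit : List Char → List (List Char)
  | [] => [[]]
  | c :: cs => if c = ' ' then [] :: pvSplit cs else pvConsHead [c] (pvSplit cs)

theorem pvConsHead_ne_nil (p : List Char) (l : List (List Char)) : pvConsHead p l ≠ [] := by
  cases l <;> simp [pvConsHead]

theorem pvSplit_ne_nil : ∀ (x : List Char), pvSplit x ≠ [] := by
  intro x
  cases x with
  | nil => simp [pvSplit]
  | cons c cs =>
    simp only [pvSplit]
    split
    · simp
    · exact pvConsHead_ne_nil _ _

theorem pvConsHead_nil (l : List (List Char)) (h : l ≠ []) : pvConsHead [] l = l := by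
  cases l with
  | nil => exact absurd rfl h
  | cons a tl => simp [pvConsHead]

theorem pvConsHead_consHead (p q : List Char) (l : List (List Char)) :
    pvConsHead p (pvConsHead q l) = pvConsHead (p ++ q) l := by
  cases l <;> simp [pvConsHead]

theorem pvGo_eq : ∀ (fuel : Nat) (l : List Char), l.length + 1 ≤ fuel →
    ∀ (cur : List Char) (acc : List (List Char)),
      PySem.Chars.splitOn.go [' '] fuel l cur acc
        = acc.reverse ++ pvConsHead cur.reverse (pvSplit l) := by
  intro fuel
  induction fuel with
  | zero => intro l hl; omega
  | succ f ih =>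
    intro l hl cur acc
    cases l with
    | nil =>
      simp [PySem.Chars.splitOn.go, pvSplit, pvConsHead]
    | cons c rest =>
      by_cases hc : c = ' '
      · subst hc
        have hpre : [' '].isPrefixOf (' ' :: rest) = true := by
          simp [List.isPrefixOf]
        simp only [PySem.Chars.splitOn.go, hpre, if_true, List.length_cons, List.drop_succ_cons,
          List.length_nil, List.drop_zero]
        rw [ih rest (by simpa using Nat.lt_of_succ_le hl) [] (cur.reverse :: acc)]
        have : pvSplit (' ' :: rest) = [] :: pvSplit rest := by simp [pvSplit]
        rw [this]
        simp only [pvConsHead, List.reverse_nil, List.reverse_cons, List.append_assoc,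
          List.append_nil, List.cons_append, List.nil_append]
        cases hps : pvSplit rest with
        | nil => exact absurd hps (pvSplit_ne_nil rest)
        | cons a tl => rfl
      · have hpre : [' '].isPrefixOf (c :: rest) = false := by
          simp [List.isPrefixOf]
          intro h; exact absurd h.symm hc
        simp only [PySem.Chars.splitOn.go, hpre, Bool.false_eq_true, if_false]
        rw [ih rest (by simp at hl ⊢; omega) (c :: cur) acc]
        have : pvSplit (c :: rest) = pvConsHead [c] (pvSplit rest) := by simp [pvSplit, hc]
        rw [this, pvConsHead_consHead]
        simp

theorem pvSplitOn_eq (x : List Char) : PySem.Chars.splitOn x [' '] = pvSplit x := by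
  show PySem.Chars.splitOn.go [' '] (x.length + 1) x [] [] = pvSplit x
  rw [pvGo_eq (x.length + 1) x le_rfl [] []]
  simp [pvConsHead_nil _ (pvSplit_ne_nil x)]

theorem pvSplit_no_space : ∀ (w : List Char), ' ' ∉ w → pvSplit w = [w] := by
  intro w
  induction w with
  | nil => intro _; rfl
  | cons c cs ih =>
    intro h
    have hc : c ≠ ' ' := fun hh => h (hh ▸ List.mem_cons_self)
    have : pvSplit cs = [cs] := ih (fun hm => h (List.mem_cons_of_mem _ hm))
    simp [pvSplit, hc, this, pvConsHead]

theorem pvSplit_append : ∀ (w rest : List Char), ' ' ∉ w →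
    pvSplit (w ++ ' ' :: rest) = w :: pvSplit rest := by
  intro w
  induction w with
  | nil => intro rest _; simp [pvSplit]
  | cons c cs ih =>
    intro rest h
    have hc : c ≠ ' ' := fun hh => h (hh ▸ List.mem_cons_self)
    have := ih rest (fun hm => h (List.mem_cons_of_mem _ hm))
    simp only [List.cons_append, pvSplit, hc, if_false, this, pvConsHead]
    simp

theorem pvFoldl_shift {α : Type} (P : α → Prop) [DecidablePred P] :
    ∀ (l : List α) (c : Nat),
      l.foldl (fun m i => if P i then m + 1 else m) c
        = c + l.foldl (fun m i => if P i then m + 1 else m) 0 := by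
  intro l
  induction l with
  | nil => simp
  | cons a l ih =>
    intro c
    simp only [List.foldl_cons]
    rw [ih, ih (if P a then 0 + 1 else 0)]
    split <;> omega

theorem pvMissesA_eq : ∀ (t w : List Char), t.length ≤ w.length → pvMissesA t w = pvMM t w := by
  intro t
  induction t with
  | nil => intro w _; cases w <;> rfl
  | cons a as ih =>
    intro w hw
    cases w with
    | nil => simp at hw
    | cons b bs =>
      simp only [pvMissesA, List.length_cons, List.range_succ_eq_map, List.foldl_cons,
        List.foldl_map, List.getD_cons_succ, List.getD_cons_zero]
      rw [pvFoldl_shift (fun i => as.getD i ' ' ≠ bs.getD i ' ')]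
      rw [show pvMM (a :: as) (b :: bs) = (if a ≠ b then 1 else 0) + pvMM as bs from rfl]
      rw [← ih bs (by simpa using hw)]
      simp only [pvMissesA]

theorem pvCnt_eq : ∀ (w t : List Char) (i : Nat), pvCnt t t.length i w = pvMM (t.drop i) w := by
  intro w
  induction w with
  | nil => intro t i; cases t.drop i <;> rfl
  | cons c cs ih =>
    intro t i
    by_cases hi : i < t.length
    · rw [List.drop_eq_getElem_cons hi]
      rw [show pvMM (t[i] :: t.drop (i+1)) (c :: cs)
            = (if t[i] ≠ c then 1 else 0) + pvMM (t.drop (i+1)) cs from rfl]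
      rw [← ih t (i+1)]
      simp only [pvCnt, hi, true_and]
      have : t.getD i ' ' = t[i] := List.getD_eq_getElem t ' ' hi
      rw [this]
      congr 1
      by_cases h : t[i] = c
      · simp [h]
      · have h' : ¬ c = t[i] := fun hh => h hh.symm
        simp [h, h']
    · have hd : t.drop i = [] := List.drop_eq_nil_of_le (by omega)
      have hd' : t.drop (i+1) = [] := List.drop_eq_nil_of_le (by omega)
      rw [hd, show pvMM ([] : List Char) (c :: cs) = 0 from rfl]
      simp only [pvCnt, hi, false_and, if_false]
      rw [ih t (i+1), hd']
      cases cs <;> rfl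

-- A's per-word decision, as a boolean head test
def pvAtest (t : List Char) (al : Nat) (w : List Char) : Bool :=
  if t.length > w.length then false
  else if pvMissesA t w = 0 then true
  else decide (pvMissesA t w ≤ al ∧ t.length = w.length)

theorem pvLoopA_cons_or (t : List Char) (al : Nat) (w : List Char) (ws : List (List Char)) :
    pvLoopA t al (w :: ws) = (pvAtest t al w || pvLoopA t al ws) := by
  simp only [pvLoopA, pvAtest]
  split
  · simp
  · split
    · simp
    · by_cases h : pvMissesA t w ≤ al ∧ t.length = w.length <;> simp [h]

theorem pvTest_eq (t : List Char) (al : Nat) (w : List Char) :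
    (decide ((t.length ≤ w.length ∧ pvMM t w = 0) ∨ (w.length = t.length ∧ pvMM t w ≤ al)))
      = pvAtest t al w := by
  unfold pvAtest
  by_cases hlen : t.length > w.length
  · rw [if_pos hlen]
    simp only [decide_eq_false_iff_not]
    rintro (⟨h1, _⟩ | ⟨h1, _⟩) <;> omega
  · rw [if_neg hlen]
    have hle : t.length ≤ w.length := not_lt.mp hlen
    rw [pvMissesA_eq t w hle]
    by_cases h0 : pvMM t w = 0
    · simp [h0, hle]
    · simp only [if_neg h0]
      have : ((t.length ≤ w.length ∧ pvMM t w = 0) ∨ (w.length = t.length ∧ pvMM t w ≤ al))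
          ↔ (pvMM t w ≤ al ∧ t.length = w.length) := by
        constructor
        · rintro (⟨_, h⟩ | ⟨h1, h2⟩)
          · exact absurd h h0
          · exact ⟨h2, h1.symm⟩
        · rintro ⟨h1, h2⟩; exact Or.inr ⟨h2.symm, h1⟩
      rw [decide_eq_decide.mpr this]

theorem pvScanB_consume (t : List Char) (al : Nat) :
    ∀ (w : List Char), ' ' ∉ w → ∀ (i m : Nat) (l : List Char),
      pvScanB t t.length al i m (w ++ l)
        = pvScanB t t.length al (i + w.length) (m + pvCnt t t.length i w) l := by
  intro w
  induction w with
  | nil => intro _ i m l; simp [pvCnt]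
  | cons c cs ih =>
    intro h i m l
    have hc : c ≠ ' ' := fun hh => h (hh ▸ List.mem_cons_self)
    have hmem : ' ' ∉ cs := fun hm => h (List.mem_cons_of_mem _ hm)
    simp only [List.cons_append, pvScanB, hc, if_false]
    rw [ih hmem (i+1) _ l]
    simp only [pvCnt, List.length_cons]
    congr 1
    · omega
    · split <;> omega

theorem pvScanB_boundary (t : List Char) (al i m : Nat) (cs : List Char) :
    pvScanB t t.length al i m (' ' :: cs)
      = (decide ((t.length ≤ i ∧ m = 0) ∨ (i = t.length ∧ m ≤ al))
          || pvScanB t t.length al 0 0 cs) := by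
  simp only [pvScanB]
  by_cases h : (t.length ≤ i ∧ m = 0) ∨ (i = t.length ∧ m ≤ al) <;> simp [h]

theorem pvMain (t : List Char) (al : Nat) :
    ∀ (x : List Char), pvScanB t t.length al 0 0 (x ++ [' ']) = pvLoopA t al (pvSplit x) := by
  intro x
  induction hn : x.length using Nat.strong_induction_on generalizing x with
  | _ n ih =>
    subst hn
    set w := x.takeWhile (fun c => c ≠ ' ') with hw
    have hwns : ' ' ∉ w := by
      intro hm
      have := List.mem_takeWhile_imp hm
      simp at this
    have hx : x = w ++ x.dropWhile (fun c => c ≠ ' ') := (List.takeWhile_append_dropWhile).symm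
    cases hd : x.dropWhile (fun c => c ≠ ' ') with
    | nil =>
      have hxw : x = w := by rw [hx, hd, List.append_nil]
      rw [hxw, pvScanB_consume t al w hwns 0 0 [' '], pvScanB_boundary]
      simp only [pvScanB, Bool.or_false]
      rw [Nat.zero_add, Nat.zero_add, pvCnt_eq w t 0, List.drop_zero]
      rw [pvSplit_no_space w hwns, pvLoopA_cons_or]
      simp only [pvLoopA, Bool.or_false]
      exact pvTest_eq t al w
    | cons d rest =>
      have hdsp : d = ' ' := by
        have := List.head_dropWhile_not (p := fun c => c ≠ ' ') (l := x)
        rw [hd] at this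
        simpa using this (by simp)
      subst hdsp
      rw [hx, hd]
      rw [List.append_assoc, List.cons_append,
        pvScanB_consume t al w hwns 0 0 (' ' :: (rest ++ [' '])), pvScanB_boundary]
      rw [Nat.zero_add, Nat.zero_add, pvCnt_eq w t 0, List.drop_zero]
      rw [pvSplit_append w rest hwns, pvLoopA_cons_or, pvTest_eq]
      congr 1
      have hlen : rest.length < x.length := by
        conv_rhs => rw [hx, hd]
        simp only [List.length_append, List.length_cons]
        omega
      exact ih rest.length hlen rest rfl

-- ===== VERDICT (by name: the statement is the Claim_ definition above) =====
theorem close_enough_search_spec : Claim_equal_close_enough_search := by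
  intro term text _
  unfold Spec_close_enough_search close_enough_search close_enough_search_alt
  show pvLoopA (PySem.Chars.lower term.toList) (pvAllowedA (PySem.Chars.lower term.toList))
      (PySem.Chars.splitOn (PySem.Chars.lower text.toList) [' '])
    = pvScanB (PySem.Chars.lower term.toList) (PySem.Chars.lower term.toList).length
      (pvAllowedB (PySem.Chars.lower term.toList)) 0 0 (PySem.Chars.lower text.toList ++ [' '])
  rw [pvSplitOn_eq, show pvAllowedA = pvAllowedB from rfl]
  exact (pvMain _ _ _).symm
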